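-- pv_equiv track=rewrite | github.com/zlochina/maze_visualisation | modules/maze_gen.py | reverse_primitive_converter
-- ===== SOURCE A (Python) =====
-- def reverse_primitive_converter(walls, type_of_walls):
--     """
--     - function to convert from primitive representation of maze boundaries
--       to the text representation of maze boundaries
--     """
--     txt = ""
--     m, n = len(walls), len(walls[0])
--
--     if type_of_walls:
--         txt_to_add = ""
--         for m_i in range(m):
--             txt_tmp = ""
--             for n_i in range(n):
--                 if walls[m_i][n_i] & 1 and not m_i == m - 1:
--                     txt += "|"
--                 elif not m_i == m - 1:
--                     txt += " "
--
--                 if walls[m_i][n_i] & 2 and not n_i == n - 1: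
--                     txt_to_add += txt_tmp + "-"
--                     txt_tmp = ""
--                 elif not n_i == n - 1:
--                     txt_tmp += " "
--
--             if not m_i == m - 1:
--                 txt += "\n"
--
--             txt_to_add += "\n"
--         return txt + "\n" + txt_to_add
--     else:
--         for m_i in range(m):
--             txt_tmp = ""
--             for n_i in range(n):
--                 if walls[m_i][n_i]:
--                     txt += txt_tmp + "#"
--                     txt_tmp = ""
--                 else:
--                     txt_tmp += " "
--             txt += "\n"
--         return txt
--     raise NameError("ReverseConvertingError: unexpected issue")
-- ===== SOURCE B (Python) =====
-- def _row_trimmed(cells, p, ch):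
--     # build the line back-to-front: blanks before the last wall char never enter out
--     out = []
--     for c in reversed(cells):
--         if p(c):
--             out.append(ch)
--         elif out:
--             out.append(' ')
--     return ''.join(reversed(out))
--
--
-- def reverse_primitive_converter(walls, type_of_walls):
--     """
--     - convert primitive maze walls to text; each trimmed line is built
--       back-to-front so trailing blanks are never produced, and rows are
--       traversed as list slices instead of nested index loops
--     """
--     n = len(walls[0])
--     if type_of_walls:
--         vertical = "".join(
--             "".join("|" if c & 1 else " " for c in r[:n]) + "\n"
--             for r in walls[:-1])
--         horizontal = "".join(
--             _row_trimmed(r[:n][:-1], lambda c: c & 2, "-") + "\n"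
--             for r in walls)
--         return vertical + "\n" + horizontal
--     return "".join(_row_trimmed(r[:n], lambda c: c != 0, "#") + "\n" for r in walls)
-- ===== Notes on version B (the rewrite author's own statement) =====
-- stated objective: alternative
-- what changed: Trimmed lines are built back-to-front over the reversed row, so trailing blanks are never emitted (no pending-space flush buffer), and rows are traversed as list slices (walls[:-1], r[:n]) instead of A's nested index loops with in-loop boundary tests.
-- outside the precondition, e.g. on reverse_primitive_converter([], False): A raises IndexError, B raises IndexError; on reverse_primitive_converter([[1, 2], [3]], True): A raises IndexError, B returns '| \n\n\n\n'
import Mathlib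
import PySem

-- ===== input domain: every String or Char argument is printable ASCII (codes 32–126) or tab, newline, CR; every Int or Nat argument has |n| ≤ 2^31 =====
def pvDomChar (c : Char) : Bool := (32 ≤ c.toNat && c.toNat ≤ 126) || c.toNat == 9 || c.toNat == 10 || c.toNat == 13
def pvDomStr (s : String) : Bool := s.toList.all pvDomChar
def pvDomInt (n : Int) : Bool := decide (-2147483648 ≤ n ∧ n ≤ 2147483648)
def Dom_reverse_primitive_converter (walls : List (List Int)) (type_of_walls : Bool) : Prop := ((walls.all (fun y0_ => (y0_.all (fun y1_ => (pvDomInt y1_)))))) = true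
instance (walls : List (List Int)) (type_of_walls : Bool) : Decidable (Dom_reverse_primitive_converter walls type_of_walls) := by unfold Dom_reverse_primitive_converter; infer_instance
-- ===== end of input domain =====

-- B builds each trimmed line back-to-front (trailing blanks are never produced) and walks rows
-- as list slices, instead of A's left-to-right index loops with a space-flush buffer; objective: alternative.

-- ===== PORT A =====
def reverse_primitive_converter (walls : List (List Int)) (type_of_walls : Bool) : String :=
  let m := walls.length
  let n := (walls.headD []).length
  if type_of_walls then
    let st :=
      (List.range m).foldl (fun (st : List Char × List Char) m_i =>
        let inner :=
          (List.range n).foldl (fun (st2 : List Char × List Char × List Char) n_i =>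
            (if PySem.Int.band ((walls.getD m_i []).getD n_i 0) 1 ≠ 0 ∧ ¬ m_i = m - 1 then st2.1 ++ ['|']
             else if ¬ m_i = m - 1 then st2.1 ++ [' ']
             else st2.1,
             if PySem.Int.band ((walls.getD m_i []).getD n_i 0) 2 ≠ 0 ∧ ¬ n_i = n - 1 then
               (st2.2.1 ++ st2.2.2 ++ ['-'], ([] : List Char))
             else if ¬ n_i = n - 1 then (st2.2.1, st2.2.2 ++ [' '])
             else st2.2)) (st.1, st.2, ([] : List Char))
        (if ¬ m_i = m - 1 then inner.1 ++ ['\n'] else inner.1,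
         inner.2.1 ++ ['\n'])) (([] : List Char), ([] : List Char))
    String.mk (st.1 ++ '\n' :: st.2)
  else
    String.mk ((List.range m).foldl (fun (txt : List Char) m_i =>
      ((List.range n).foldl (fun (st2 : List Char × List Char) n_i =>
        if (walls.getD m_i []).getD n_i 0 ≠ 0 then (st2.1 ++ st2.2 ++ ['#'], ([] : List Char))
        else (st2.1, st2.2 ++ [' '])) (txt, ([] : List Char))).1 ++ ['\n']) [])

-- ===== PORT B =====
-- Source B's _row_trimmed: iterate the cells reversed, append the wall char, append a blank only
-- once 'out' is nonempty, and reverse at the end.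
def pvRowTrimmed (p : Int → Prop) [DecidablePred p] (ch : Char) (cells : List Int) : List Char :=
  (cells.reverse.foldl (fun (out : List Char) c =>
      if p c then out ++ [ch]
      else if out ≠ [] then out ++ [' '] else out) []).reverse

def reverse_primitive_converter_alt (walls : List (List Int)) (type_of_walls : Bool) : String :=
  let n := (walls.headD []).length
  if type_of_walls then
    let vertical := (walls.dropLast.map (fun r =>
      (r.take n).map (fun c => if PySem.Int.band c 1 ≠ 0 then '|' else ' ') ++ ['\n'])).flatten
    let horizontal := (walls.map (fun r =>
      pvRowTrimmed (fun c => PySem.Int.band c 2 ≠ 0) '-' ((r.take n).dropLast) ++ ['\n'])).flatten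
    String.mk (vertical ++ '\n' :: horizontal)
  else
    String.mk ((walls.map (fun r =>
      pvRowTrimmed (fun c => c ≠ 0) '#' (r.take n) ++ ['\n'])).flatten)

-- ===== PRECONDITION & SPEC =====
-- Pre_ excludes exactly the inputs where the Python A raises IndexError:
-- an empty walls list (walls[0]) and rows shorter than the first row (walls[m_i][n_i]).
def Pre_reverse_primitive_converter (walls : List (List Int)) (type_of_walls : Bool) : Prop :=
  walls ≠ [] ∧ ∀ row ∈ walls, (walls.headD []).length ≤ row.length
instance (walls : List (List Int)) (type_of_walls : Bool) : Decidable (Pre_reverse_primitive_converter walls type_of_walls) := by unfold Pre_reverse_primitive_converter; infer_instance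

def pvWitness_reverse_primitive_converter : List (List Int) × Bool := ([[1, 2], [3, 0]], true)

def Spec_reverse_primitive_converter (walls : List (List Int)) (type_of_walls : Bool) (out : String) : Prop := out = reverse_primitive_converter_alt walls type_of_walls
instance (walls : List (List Int)) (type_of_walls : Bool) (out : String) : Decidable (Spec_reverse_primitive_converter walls type_of_walls out) := by unfold Spec_reverse_primitive_converter; infer_instance

-- ===== CLAIM (what is proved, stated in full; the proofs are below) =====
def Claim_equal_reverse_primitive_converter : Prop := ∀ (walls : List (List Int)) (type_of_walls : Bool), Dom_reverse_primitive_converter walls type_of_walls → Pre_reverse_primitive_converter walls type_of_walls → Spec_reverse_primitive_converter walls type_of_walls (reverse_primitive_converter walls type_of_walls)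

-- ===== LEMMAS AND PROOFS =====

-- rstrip, computed from the left
theorem pv_rstrip_cons (c : Char) (xs : List Char) :
    PySem.Chars.rstrip (c :: xs) =
      if PySem.Chars.rstrip xs = [] then (if PySem.Chars.isspace c then [] else [c])
      else c :: PySem.Chars.rstrip xs := by
  simp only [PySem.Chars.rstrip, List.reverse_cons, List.dropWhile_append]
  by_cases h : List.dropWhile PySem.Chars.isspace xs.reverse = []
  · cases hc : PySem.Chars.isspace c <;> simp [h, List.dropWhile, hc]
  · simp [h, List.isEmpty_iff]

-- a fold over any list: the same step function pointwise gives the same fold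
theorem pv_foldl_congr_mem {α β : Type} (L : List α) (f g : β → α → β) (b : β)
    (h : ∀ x ∈ L, ∀ a, f a x = g a x) : L.foldl f b = L.foldl g b := by
  induction L generalizing b with
  | nil => rfl
  | cons x L ih =>
      simp only [List.foldl_cons]
      rw [h x (by simp)]
      exact ih _ (fun y hy a => h y (by simp [hy]) a)

-- the space-flush buffer fold produces the rstripped rendered row
theorem pv_flush_fold {α : Type} (L : List α) (p : α → Prop) [DecidablePred p]
    (ch : Char) (hch : PySem.Chars.isspace ch = false) (t s : List Char) :
    (L.foldl (fun (pr : List Char × List Char) x =>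
        if p x then (pr.1 ++ pr.2 ++ [ch], ([] : List Char)) else (pr.1, pr.2 ++ [' '])) (t, s)).1 =
      t ++ (if PySem.Chars.rstrip (L.map (fun x => if p x then ch else ' ')) = [] then []
            else s ++ PySem.Chars.rstrip (L.map (fun x => if p x then ch else ' '))) := by
  induction L generalizing t s with
  | nil => simp [PySem.Chars.rstrip]
  | cons x L ih =>
      by_cases hp : p x
      · simp only [List.foldl_cons, List.map_cons, if_pos hp, pv_rstrip_cons, hch]
        rw [ih]
        by_cases h0 : PySem.Chars.rstrip (L.map (fun x => if p x then ch else ' ')) = [] <;>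
          simp [h0]
      · simp only [List.foldl_cons, List.map_cons, if_neg hp, pv_rstrip_cons]
        rw [ih]
        by_cases h0 : PySem.Chars.rstrip (L.map (fun x => if p x then ch else ' ')) = [] <;>
          simp [h0, PySem.Chars.isspace]

theorem pv_flush_fold' {α : Type} (L : List α) (p : α → Prop) [DecidablePred p]
    (ch : Char) (hch : PySem.Chars.isspace ch = false) (t : List Char) :
    (L.foldl (fun (pr : List Char × List Char) x =>
        if p x then (pr.1 ++ pr.2 ++ [ch], ([] : List Char)) else (pr.1, pr.2 ++ [' '])) (t, [])).1 =
      t ++ PySem.Chars.rstrip (L.map (fun x => if p x then ch else ' ')) := by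
  rw [pv_flush_fold L p ch hch]
  by_cases h0 : PySem.Chars.rstrip (L.map (fun x => if p x then ch else ' ')) = [] <;> simp [h0]

theorem pv_isspace_space : PySem.Chars.isspace ' ' = true := by decide

theorem pv_isspace_hash : PySem.Chars.isspace '#' = false := by decide
theorem pv_isspace_dash : PySem.Chars.isspace '-' = false := by decide

theorem pv_range_succ_pred (m : Nat) (hm : 1 ≤ m) :
    List.range m = List.range (m - 1) ++ [m - 1] := by
  have h : m = (m - 1) + 1 := by omega
  conv_lhs => rw [h]
  rw [List.range_succ]

-- componentwise fold of an independent pair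
theorem pv_foldl_prod {α β γ : Type} (L : List α) (f : β → α → β) (g : γ → α → γ) (a : β) (b : γ) :
    L.foldl (fun (p : β × γ) x => (f p.1 x, g p.2 x)) (a, b) = (L.foldl f a, L.foldl g b) := by
  induction L generalizing a b with
  | nil => rfl
  | cons x L ih => simpa using ih (f a x) (g b x)

-- the vertical component of the wall branch's inner loop
theorem pv_vert_comp (walls : List (List Int)) (mlast m_i : Nat) (K : List Nat) (t : List Char) :
    K.foldl (fun (t : List Char) n_i =>
        if PySem.Int.band ((walls.getD m_i []).getD n_i 0) 1 ≠ 0 ∧ ¬ m_i = mlast then t ++ ['|']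
        else if ¬ m_i = mlast then t ++ [' '] else t) t
    = t ++ (if m_i = mlast then [] else K.map (fun j =>
        if PySem.Int.band ((walls.getD m_i []).getD j 0) 1 ≠ 0 then '|' else ' ')) := by
  induction K generalizing t with
  | nil => simp
  | cons j K ih =>
      simp only [List.foldl_cons, List.map_cons]
      rw [ih]
      by_cases hm : m_i = mlast
      · simp [hm]
      · by_cases hb : PySem.Int.band ((walls.getD m_i []).getD j 0) 1 ≠ 0
        · rw [if_pos (⟨hb, hm⟩ : _ ∧ ¬ m_i = mlast), if_pos hb]
          simp [hm]
        · rw [if_neg (fun hc => hb hc.1), if_pos hm, if_neg hb]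
          simp [hm]

-- the inner loop of the wall branch splits into its vertical and horizontal components
theorem pv_inner3 (walls : List (List Int)) (mlast nlast m_i : Nat) (K : List Nat)
    (t h s : List Char) :
    K.foldl (fun (st2 : List Char × List Char × List Char) n_i =>
        (if PySem.Int.band ((walls.getD m_i []).getD n_i 0) 1 ≠ 0 ∧ ¬ m_i = mlast then st2.1 ++ ['|']
         else if ¬ m_i = mlast then st2.1 ++ [' ']
         else st2.1,
         if PySem.Int.band ((walls.getD m_i []).getD n_i 0) 2 ≠ 0 ∧ ¬ n_i = nlast then
           (st2.2.1 ++ st2.2.2 ++ ['-'], ([] : List Char))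
         else if ¬ n_i = nlast then (st2.2.1, st2.2.2 ++ [' '])
         else st2.2)) (t, h, s)
    = (t ++ (if m_i = mlast then [] else K.map (fun j =>
          if PySem.Int.band ((walls.getD m_i []).getD j 0) 1 ≠ 0 then '|' else ' ')),
       K.foldl (fun (pr : List Char × List Char) n_i =>
         if PySem.Int.band ((walls.getD m_i []).getD n_i 0) 2 ≠ 0 ∧ ¬ n_i = nlast then
           (pr.1 ++ pr.2 ++ ['-'], ([] : List Char))
         else if ¬ n_i = nlast then (pr.1, pr.2 ++ [' '])
         else pr) (h, s)) := by
  refine (pv_foldl_prod K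
      (fun (t : List Char) n_i =>
        if PySem.Int.band ((walls.getD m_i []).getD n_i 0) 1 ≠ 0 ∧ ¬ m_i = mlast then t ++ ['|']
        else if ¬ m_i = mlast then t ++ [' '] else t)
      (fun (pr : List Char × List Char) n_i =>
        if PySem.Int.band ((walls.getD m_i []).getD n_i 0) 2 ≠ 0 ∧ ¬ n_i = nlast then
          (pr.1 ++ pr.2 ++ ['-'], ([] : List Char))
        else if ¬ n_i = nlast then (pr.1, pr.2 ++ [' '])
        else pr) t (h, s)).trans ?_
  rw [pv_vert_comp]

-- the horizontal flush loop over range n: last index is a no-op, the rest is the flush buffer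
theorem pv_hor_row (walls : List (List Int)) (m_i n : Nat) (h : List Char) :
    ((List.range n).foldl (fun (pr : List Char × List Char) n_i =>
        if PySem.Int.band ((walls.getD m_i []).getD n_i 0) 2 ≠ 0 ∧ ¬ n_i = n - 1 then
          (pr.1 ++ pr.2 ++ ['-'], ([] : List Char))
        else if ¬ n_i = n - 1 then (pr.1, pr.2 ++ [' '])
        else pr) (h, ([] : List Char))).1
    = h ++ PySem.Chars.rstrip ((List.range (n - 1)).map (fun j =>
        if PySem.Int.band ((walls.getD m_i []).getD j 0) 2 ≠ 0 then '-' else ' ')) := by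
  rcases Nat.eq_zero_or_pos n with h0 | h1
  · subst h0; simp [PySem.Chars.rstrip]
  · rw [pv_range_succ_pred n h1, List.foldl_append]
    simp only [List.foldl_cons, List.foldl_nil, not_true_eq_false, and_false, if_false]
    rw [pv_foldl_congr_mem (List.range (n - 1)) _
        (fun (pr : List Char × List Char) n_i =>
          if PySem.Int.band ((walls.getD m_i []).getD n_i 0) 2 ≠ 0 then
            (pr.1 ++ pr.2 ++ ['-'], ([] : List Char))
          else (pr.1, pr.2 ++ [' '])) (h, ([] : List Char))
        (by
          intro j hj pr
          have hne : ¬ j = n - 1 := by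
            have := List.mem_range.mp hj
            omega
          simp [hne])]
    rw [pv_flush_fold' (List.range (n - 1))
        (fun n_i => PySem.Int.band ((walls.getD m_i []).getD n_i 0) 2 ≠ 0) '-' pv_isspace_dash h]

-- the whole wall-branch outer loop, over an arbitrary list of row indices
theorem pv_true_fold (walls : List (List Int)) (n mlast : Nat) (L : List Nat) (a b : List Char) :
    L.foldl (fun (st : List Char × List Char) m_i =>
        (if ¬ m_i = mlast then
           ((List.range n).foldl (fun (st2 : List Char × List Char × List Char) n_i =>
            (if PySem.Int.band ((walls.getD m_i []).getD n_i 0) 1 ≠ 0 ∧ ¬ m_i = mlast then st2.1 ++ ['|']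
             else if ¬ m_i = mlast then st2.1 ++ [' ']
             else st2.1,
             if PySem.Int.band ((walls.getD m_i []).getD n_i 0) 2 ≠ 0 ∧ ¬ n_i = n - 1 then
               (st2.2.1 ++ st2.2.2 ++ ['-'], ([] : List Char))
             else if ¬ n_i = n - 1 then (st2.2.1, st2.2.2 ++ [' '])
             else st2.2)) (st.1, st.2, ([] : List Char))).1 ++ ['\n']
         else
           ((List.range n).foldl (fun (st2 : List Char × List Char × List Char) n_i =>
            (if PySem.Int.band ((walls.getD m_i []).getD n_i 0) 1 ≠ 0 ∧ ¬ m_i = mlast then st2.1 ++ ['|']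
             else if ¬ m_i = mlast then st2.1 ++ [' ']
             else st2.1,
             if PySem.Int.band ((walls.getD m_i []).getD n_i 0) 2 ≠ 0 ∧ ¬ n_i = n - 1 then
               (st2.2.1 ++ st2.2.2 ++ ['-'], ([] : List Char))
             else if ¬ n_i = n - 1 then (st2.2.1, st2.2.2 ++ [' '])
             else st2.2)) (st.1, st.2, ([] : List Char))).1,
         ((List.range n).foldl (fun (st2 : List Char × List Char × List Char) n_i =>
            (if PySem.Int.band ((walls.getD m_i []).getD n_i 0) 1 ≠ 0 ∧ ¬ m_i = mlast then st2.1 ++ ['|']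
             else if ¬ m_i = mlast then st2.1 ++ [' ']
             else st2.1,
             if PySem.Int.band ((walls.getD m_i []).getD n_i 0) 2 ≠ 0 ∧ ¬ n_i = n - 1 then
               (st2.2.1 ++ st2.2.2 ++ ['-'], ([] : List Char))
             else if ¬ n_i = n - 1 then (st2.2.1, st2.2.2 ++ [' '])
             else st2.2)) (st.1, st.2, ([] : List Char))).2.1 ++ ['\n'])) (a, b)
    = (a ++ (L.map (fun i => if i = mlast then [] else
          ((List.range n).map (fun j =>
            if PySem.Int.band ((walls.getD i []).getD j 0) 1 ≠ 0 then '|' else ' ')) ++ ['\n'])).flatten,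
       b ++ (L.map (fun i =>
          PySem.Chars.rstrip ((List.range (n - 1)).map (fun j =>
            if PySem.Int.band ((walls.getD i []).getD j 0) 2 ≠ 0 then '-' else ' ')) ++ ['\n'])).flatten) := by
  induction L generalizing a b with
  | nil => simp
  | cons i L ih =>
      simp only [List.foldl_cons, List.map_cons, List.flatten_cons]
      try dsimp only
      rw [pv_inner3 walls mlast (n - 1) i (List.range n) a b []]
      try dsimp only
      rw [pv_hor_row walls i n b]
      rw [ih]
      by_cases hi : i = mlast <;> simp [hi, List.append_assoc]

-- the pound branch outer loop, over an arbitrary list of row indices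
theorem pv_false_fold (walls : List (List Int)) (n : Nat) (L : List Nat) (t : List Char) :
    L.foldl (fun (txt : List Char) m_i =>
      ((List.range n).foldl (fun (st2 : List Char × List Char) n_i =>
        if (walls.getD m_i []).getD n_i 0 ≠ 0 then (st2.1 ++ st2.2 ++ ['#'], ([] : List Char))
        else (st2.1, st2.2 ++ [' '])) (txt, ([] : List Char))).1 ++ ['\n']) t
    = t ++ (L.map (fun i =>
        PySem.Chars.rstrip ((List.range n).map (fun j =>
          if (walls.getD i []).getD j 0 ≠ 0 then '#' else ' ')) ++ ['\n'])).flatten := by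
  induction L generalizing t with
  | nil => simp
  | cons i L ih =>
      simp only [List.foldl_cons, List.map_cons, List.flatten_cons]
      rw [pv_flush_fold' (List.range n)
          (fun n_i => (walls.getD i []).getD n_i 0 ≠ 0) '#' pv_isspace_hash t]
      rw [ih]
      simp

theorem pv_vert_flatten (f : Nat → List Char) (m : Nat) (hm : 1 ≤ m) :
    ((List.range m).map (fun i => if i = m - 1 then [] else f i)).flatten
    = ((List.range (m - 1)).map f).flatten := by
  rw [pv_range_succ_pred m hm, List.map_append, List.flatten_append]
  have h2 : (List.range (m - 1)).map (fun i => if i = m - 1 then [] else f i)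
      = (List.range (m - 1)).map f :=
    List.map_congr_left (fun i hi => by
      have : i < m - 1 := List.mem_range.mp hi
      simp [Nat.ne_of_lt this])
  rw [h2]
  simp

-- ===== bridge lemmas: B's back-to-front builder equals rstrip ∘ map =====
theorem pv_rowTrimmed_eq (p : Int → Prop) [DecidablePred p] (ch : Char)
    (hch : PySem.Chars.isspace ch = false) (cells : List Int) :
    pvRowTrimmed p ch cells = PySem.Chars.rstrip (cells.map (fun c => if p c then ch else ' ')) := by
  unfold pvRowTrimmed
  rw [List.foldl_reverse]
  induction cells with
  | nil => simp [PySem.Chars.rstrip]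
  | cons c cs ih =>
      rw [List.foldr_cons, List.map_cons, pv_rstrip_cons, ← ih]
      generalize (List.foldr (fun x (y : List Char) =>
          if p x then y ++ [ch] else if y ≠ [] then y ++ [' '] else y) [] cs) = F
      by_cases hp : p c <;> by_cases hF : F = [] <;>
        simp [hp, hF, hch, pv_isspace_space]

-- indexing a prefix through getD equals mapping over take
theorem pv_range_map_getD {α β : Type} (xs : List α) (d : α) (g : α → β) (k : Nat)
    (hk : k ≤ xs.length) :
    (List.range k).map (fun i => g (xs.getD i d)) = (xs.take k).map g := by
  apply List.ext_getElem
  · simp [Nat.min_eq_left hk]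
  · intro i h1 h2
    have hi : i < k := by simpa using h1
    have hix : i < xs.length := lt_of_lt_of_le hi hk
    simp [List.getD_eq_getElem?_getD, List.getElem?_eq_getElem hix]

theorem pv_take_dropLast {α : Type} (xs : List α) (k : Nat) (hk : k ≤ xs.length) :
    (xs.take k).dropLast = xs.take (k - 1) := by
  rw [List.dropLast_eq_take, List.take_take, List.length_take, Nat.min_eq_left hk]
  congr 1
  omega

theorem pv_false_branch (walls : List (List Int))
    (hrows : ∀ row ∈ walls, (walls.headD []).length ≤ row.length) :
    reverse_primitive_converter walls false = reverse_primitive_converter_alt walls false := by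
  unfold reverse_primitive_converter reverse_primitive_converter_alt
  simp only [Bool.false_eq_true, if_false]
  rw [pv_false_fold walls ((walls.headD []).length) (List.range walls.length) []]
  rw [pv_range_map_getD walls [] (fun r =>
      PySem.Chars.rstrip ((List.range ((walls.headD []).length)).map (fun j =>
        if r.getD j 0 ≠ 0 then '#' else ' ')) ++ ['\n']) walls.length (le_refl _)]
  rw [List.take_length]
  simp only [List.nil_append]
  refine congrArg String.mk (congrArg List.flatten (List.map_congr_left ?_))
  intro r hr
  rw [pv_range_map_getD r 0 (fun c => if c ≠ 0 then '#' else ' ')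
      ((walls.headD []).length) (hrows r hr)]
  rw [pv_rowTrimmed_eq (fun c => c ≠ 0) '#' pv_isspace_hash]

theorem pv_true_branch (walls : List (List Int)) (hw : walls ≠ [])
    (hrows : ∀ row ∈ walls, (walls.headD []).length ≤ row.length) :
    reverse_primitive_converter walls true = reverse_primitive_converter_alt walls true := by
  unfold reverse_primitive_converter reverse_primitive_converter_alt
  simp only [reduceIte]
  rw [pv_true_fold walls ((walls.headD []).length) (walls.length - 1) (List.range walls.length) [] []]
  have hm : 1 ≤ walls.length := List.length_pos_of_ne_nil hw
  rw [pv_vert_flatten _ walls.length hm]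
  have hver :
      ((List.range (walls.length - 1)).map (fun i =>
        ((List.range ((walls.headD []).length)).map (fun j =>
          if PySem.Int.band ((walls.getD i []).getD j 0) 1 ≠ 0 then '|' else ' ')) ++ ['\n'])).flatten
      = (walls.dropLast.map (fun r =>
          (r.take ((walls.headD []).length)).map
            (fun c => if PySem.Int.band c 1 ≠ 0 then '|' else ' ') ++ ['\n'])).flatten := by
    rw [pv_range_map_getD walls [] (fun r =>
        ((List.range ((walls.headD []).length)).map (fun j =>
          if PySem.Int.band (r.getD j 0) 1 ≠ 0 then '|' else ' ')) ++ ['\n'])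
        (walls.length - 1) (Nat.sub_le _ _)]
    rw [← List.dropLast_eq_take]
    refine congrArg List.flatten (List.map_congr_left ?_)
    intro r hr
    have hrw : r ∈ walls := List.mem_of_mem_dropLast hr
    rw [pv_range_map_getD r 0 (fun c => if PySem.Int.band c 1 ≠ 0 then '|' else ' ')
        ((walls.headD []).length) (hrows r hrw)]
  have hhor :
      ((List.range walls.length).map (fun i =>
        PySem.Chars.rstrip ((List.range ((walls.headD []).length - 1)).map (fun j =>
          if PySem.Int.band ((walls.getD i []).getD j 0) 2 ≠ 0 then '-' else ' ')) ++ ['\n'])).flatten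
      = (walls.map (fun r =>
          pvRowTrimmed (fun c => PySem.Int.band c 2 ≠ 0) '-'
            ((r.take ((walls.headD []).length)).dropLast) ++ ['\n'])).flatten := by
    rw [pv_range_map_getD walls [] (fun r =>
        PySem.Chars.rstrip ((List.range ((walls.headD []).length - 1)).map (fun j =>
          if PySem.Int.band (r.getD j 0) 2 ≠ 0 then '-' else ' ')) ++ ['\n'])
        walls.length (le_refl _)]
    rw [List.take_length]
    refine congrArg List.flatten (List.map_congr_left ?_)
    intro r hr
    rw [pv_range_map_getD r 0 (fun c => if PySem.Int.band c 2 ≠ 0 then '-' else ' ')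
        ((walls.headD []).length - 1) (le_trans (Nat.sub_le _ _) (hrows r hr))]
    rw [pv_rowTrimmed_eq (fun c => PySem.Int.band c 2 ≠ 0) '-' pv_isspace_dash]
    rw [pv_take_dropLast r ((walls.headD []).length) (hrows r hr)]
  rw [hver, hhor]
  simp

-- ===== VERDICT (by name: the statement is the Claim_ definition above) =====
theorem reverse_primitive_converter_spec : Claim_equal_reverse_primitive_converter := by
  intro walls type_of_walls _hdom hpre
  unfold Spec_reverse_primitive_converter
  cases type_of_walls with
  | false => exact pv_false_branch walls hpre.2
  | true => exact pv_true_branch walls hpre.1 hpre.2
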